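-- pv_equiv track=rewrite | github.com/mohamadsolkhannawawi/informatics-practicum-portfolio | Semester-1/08-Programming-Fundamentals/MusuhZeta.py | DescendingSortUnique
-- ===== SOURCE A (Python) =====
-- def Konso(e,L):
--     if L == []:
--         return [e]
--     else:
--         return [e] + L
--
-- def FirstElmt(L):
--     if L == [] :
--         return None
--     else:
--         return L[0]
--
-- def Head(L):
--     if L == []:
--         return []
--     else:
--         return L[:-1]
--
-- def Tail(L):
--     if L == []:
--         return []
--     else:
--         return L[1:]
--
-- def IsEmpty(L):
--     return L == []
--
-- def IsOneElmt(L):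
--     return Head(L) == []
--
-- def Max(a,b):
--     if a >= b :
--         return a
--     else:
--         return b
--
-- def DeleteElm(L1, X):
--     if IsEmpty(X):
--         return []
--     else:
--         if FirstElmt(X) == L1:
--             return Tail(X)
--         else:
--             return Konso(FirstElmt(X), DeleteElm(L1,Tail(X)))
--
-- def IsMember(X,L):
--     if IsEmpty(L):
--         return False
--     elif X == FirstElmt(L):
--         return True
--     else:
--         return IsMember(X,Tail(L))
--
-- def maxList(S):
--     if IsOneElmt(S):
--         return FirstElmt(S)
--     else:
--         return Max(FirstElmt(S),maxList(Tail(S)))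
--
-- def DescendingSortUnique(L):
--     if IsEmpty(L) :
--         return []
--     else:
--         if IsMember(maxList(L),DeleteElm(maxList(L),L)):
--             return DescendingSortUnique(DeleteElm(maxList(L), L))
--         else:
--             return Konso(maxList(L), DescendingSortUnique(DeleteElm(maxList(L), L)))
-- ===== SOURCE B (Python) =====
-- def DescendingSortUnique(L):
--     res = []
--     for x in sorted(L, reverse=True):
--         if not res or res[-1] != x:
--             res.append(x)
--     return res
-- ===== Notes on version B (the rewrite author's own statement) =====
-- stated objective: faster
-- what changed: Replaces A's repeated max-extraction with recursive delete/membership passes by a single reverse sort followed by one linear adjacent-deduplication pass.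
import Mathlib
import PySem

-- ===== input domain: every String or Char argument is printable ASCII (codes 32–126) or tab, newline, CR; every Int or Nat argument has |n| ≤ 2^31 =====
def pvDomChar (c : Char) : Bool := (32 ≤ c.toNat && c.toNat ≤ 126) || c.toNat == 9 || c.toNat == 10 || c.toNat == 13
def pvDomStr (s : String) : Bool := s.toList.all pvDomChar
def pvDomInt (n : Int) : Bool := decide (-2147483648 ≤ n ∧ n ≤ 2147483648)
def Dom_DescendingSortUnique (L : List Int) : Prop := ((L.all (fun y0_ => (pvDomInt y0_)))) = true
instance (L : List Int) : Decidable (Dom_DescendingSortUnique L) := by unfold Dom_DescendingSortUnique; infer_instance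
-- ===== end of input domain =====

-- B replaces A's repeated max-extraction/delete recursion by one reverse sort plus a
-- single adjacent-deduplication pass (objective: faster).

-- ===== PORT A =====
-- Konso(e, L): [e] if L == [] else [e] + L
def KonsoA (e : Int) (L : List Int) : List Int :=
  if L = [] then [e] else e :: L

-- FirstElmt(L): None if L == [] else L[0]
def FirstElmtA (L : List Int) : Option Int :=
  match L with
  | [] => none
  | x :: _ => some x

-- Head(L): [] if L == [] else L[:-1]  (L[:-1] = dropLast, exact for every list)
def HeadA (L : List Int) : List Int :=
  if L = [] then [] else L.dropLast

def IsEmptyA (L : List Int) : Bool := L = []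

def IsOneElmtA (L : List Int) : Bool := HeadA L = []

def MaxA (a b : Int) : Int := if a ≥ b then a else b

-- both branches of Konso build e :: L (used by the termination lemmas below and the proofs)
theorem KonsoA_eq (e : Int) (L : List Int) : KonsoA e L = e :: L := by
  unfold KonsoA; split <;> simp_all

-- DeleteElm(L1, X): the [] / FirstElmt == L1 / Konso branches, in order, rendered as a match
def DeleteElmA (L1 : Int) (X : List Int) : List Int :=
  match X with
  | [] => []
  | x :: xs => if x = L1 then xs else KonsoA x (DeleteElmA L1 xs)

-- IsMember(X, L): the [] / X == FirstElmt / recurse-on-Tail branches, rendered as a match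
def IsMemberA (X : Int) (L : List Int) : Bool :=
  match L with
  | [] => false
  | y :: ys => if X = y then true else IsMemberA X ys

-- maxList(S): FirstElmt(S) if IsOneElmt(S) else Max(FirstElmt(S), maxList(Tail(S)));
-- Option models Python's None: the `none` branches are exactly where Python's FirstElmt
-- returns None (never reached for the nonempty lists maxList is applied to).
def maxListA (S : List Int) : Option Int :=
  if IsOneElmtA S then FirstElmtA S
  else
    match S with
    | [] => none
    | x :: xs =>
      match maxListA xs with
      | some m => some (MaxA x m)
      | none => none

-- helper facts the port's termination argument cites
theorem maxListA_mem : ∀ (S : List Int) (m : Int), maxListA S = some m → m ∈ S := by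
  intro S
  induction S with
  | nil => intro m h; simp [maxListA, IsOneElmtA, HeadA, FirstElmtA] at h
  | cons x xs ih =>
    intro m h
    by_cases h1 : IsOneElmtA (x :: xs)
    · simp [maxListA, h1, FirstElmtA] at h; simp [h]
    · simp only [maxListA, h1] at h
      cases hm : maxListA xs with
      | none => simp [hm] at h
      | some k =>
        simp [hm] at h
        rcases h with h
        by_cases hxk : x ≥ k
        · simp [MaxA, hxk] at h; simp [h]
        · simp [MaxA, hxk] at h; exact List.mem_cons_of_mem _ (h ▸ ih k hm)

theorem DeleteElmA_length_lt : ∀ (X : List Int) (m : Int), m ∈ X →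
    (DeleteElmA m X).length < X.length := by
  intro X m
  induction X with
  | nil => intro h; simp at h
  | cons x xs ih =>
    intro h
    by_cases hx : x = m
    · simp [DeleteElmA, hx]
    · have hm : m ∈ xs := by
        rcases List.mem_cons.mp h with h' | h'
        · exact absurd h'.symm hx
        · exact h'
      simp only [DeleteElmA, hx, KonsoA_eq]
      simpa using ih hm

-- DescendingSortUnique(L): the `none` branch is where Python's maxList would have returned
-- None (unreachable: maxListA is some on every nonempty list)
def DescendingSortUnique (L : List Int) : List Int :=
  if IsEmptyA L then []
  else
    match hm : maxListA L with
    | none => []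
    | some m =>
      if IsMemberA m (DeleteElmA m L) then DescendingSortUnique (DeleteElmA m L)
      else KonsoA m (DescendingSortUnique (DeleteElmA m L))
termination_by L.length
decreasing_by
  all_goals exact DeleteElmA_length_lt L m (maxListA_mem L m hm)

-- ===== PORT B =====
-- res = []; for x in sorted(L, reverse=True): if not res or res[-1] != x: res.append(x)
def DescendingSortUnique_alt (L : List Int) : List Int :=
  (PySem.List.sorted L (fun x => x) true).foldl
    (fun res x => if res = [] ∨ res.getLast? ≠ some x then res ++ [x] else res) []

-- ===== PRECONDITION & SPEC =====
def Spec_DescendingSortUnique (L : List Int) (out : List Int) : Prop := out = DescendingSortUnique_alt L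
instance (L : List Int) (out : List Int) : Decidable (Spec_DescendingSortUnique L out) := by unfold Spec_DescendingSortUnique; infer_instance

-- ===== CLAIM (what is proved, stated in full; the proofs are below) =====
def Claim_equal_DescendingSortUnique : Prop := ∀ (L : List Int), Dom_DescendingSortUnique L → Spec_DescendingSortUnique L (DescendingSortUnique L)

-- ===== LEMMAS AND PROOFS =====

theorem IsMemberA_iff : ∀ (x : Int) (L : List Int), IsMemberA x L = true ↔ x ∈ L := by
  intro x L
  induction L with
  | nil => simp [IsMemberA]
  | cons y ys ih =>
    by_cases h : x = y
    · simp [IsMemberA, h]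
    · simp [IsMemberA, h, ih]

theorem mem_DeleteElmA : ∀ (X : List Int) (m y : Int), y ∈ DeleteElmA m X → y ∈ X := by
  intro X m y
  induction X with
  | nil => simp [DeleteElmA]
  | cons x xs ih =>
    by_cases hx : x = m
    · simp [DeleteElmA, hx]; intro h; exact Or.inr h
    · simp only [DeleteElmA, hx, KonsoA_eq]
      simp; rintro (h | h)
      · exact Or.inl h
      · exact Or.inr (ih h)

theorem mem_DeleteElmA_of_ne : ∀ (X : List Int) (m y : Int), y ∈ X → y ≠ m →
    y ∈ DeleteElmA m X := by
  intro X m y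
  induction X with
  | nil => simp
  | cons x xs ih =>
    intro hy hne
    by_cases hx : x = m
    · simp [DeleteElmA, hx]
      rcases List.mem_cons.mp hy with h | h
      · exact absurd (h.trans hx) hne
      · exact h
    · simp only [DeleteElmA, hx, KonsoA_eq]
      rcases List.mem_cons.mp hy with h | h
      · simp [h]
      · simp [ih h hne]

-- set of A's result, given the branch test on m ∈ DeleteElm
theorem mem_DeleteElmA_iff_of_mem (X : List Int) (m y : Int) (hmem : m ∈ DeleteElmA m X) :
    y ∈ DeleteElmA m X ↔ y ∈ X := by
  constructor
  · exact mem_DeleteElmA X m y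
  · intro hy
    by_cases hym : y = m
    · exact hym ▸ hmem
    · exact mem_DeleteElmA_of_ne X m y hy hym

theorem mem_DeleteElmA_iff_of_not_mem (X : List Int) (m y : Int) (hmem : m ∉ DeleteElmA m X) :
    y ∈ DeleteElmA m X ↔ (y ∈ X ∧ y ≠ m) := by
  constructor
  · intro h
    refine ⟨mem_DeleteElmA X m y h, ?_⟩
    intro he; exact hmem (he ▸ h)
  · intro ⟨h1, h2⟩; exact mem_DeleteElmA_of_ne X m y h1 h2

theorem maxListA_isSome : ∀ (S : List Int), S ≠ [] → ∃ m, maxListA S = some m := by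
  intro S
  induction S with
  | nil => intro h; exact absurd rfl h
  | cons x xs ih =>
    intro _
    by_cases h1 : IsOneElmtA (x :: xs)
    · exact ⟨x, by simp [maxListA, h1, FirstElmtA]⟩
    · have hxs : xs ≠ [] := by
        intro he; subst he; simp [IsOneElmtA, HeadA] at h1
      obtain ⟨k, hk⟩ := ih hxs
      exact ⟨MaxA x k, by simp [maxListA, h1, hk]⟩

theorem maxListA_ge : ∀ (S : List Int) (m : Int), maxListA S = some m → ∀ y ∈ S, y ≤ m := by
  intro S
  induction S with
  | nil => intro m h; simp [maxListA, IsOneElmtA, HeadA, FirstElmtA] at h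
  | cons x xs ih =>
    intro m h y hy
    by_cases h1 : IsOneElmtA (x :: xs)
    · have hxs : xs = [] := by
        cases xs with
        | nil => rfl
        | cons b bs => simp [IsOneElmtA, HeadA] at h1
      subst hxs
      simp [maxListA, h1, FirstElmtA] at h
      simp at hy
      omega
    · simp only [maxListA, h1] at h
      cases hk : maxListA xs with
      | none => simp [hk] at h
      | some k =>
        simp [hk] at h
        have hxm : x ≤ m ∧ k ≤ m := by
          by_cases hxk : x ≥ k <;> simp [MaxA, hxk] at h <;> omega
        rcases List.mem_cons.mp hy with h' | h'
        · omega
        · exact le_trans (ih k hk y h') hxm.2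

-- the characterisation of A: strictly descending, same members as L
theorem DescendingSortUnique_char : ∀ (L : List Int),
    (DescendingSortUnique L).Pairwise (· > ·) ∧ (∀ y, y ∈ DescendingSortUnique L ↔ y ∈ L) := by
  intro L
  induction L using DescendingSortUnique.induct with
  | case1 L hE =>
    have : L = [] := by simpa [IsEmptyA] using hE
    subst this
    simp [DescendingSortUnique, IsEmptyA]
  | case2 L hE hm =>
    have hne : L ≠ [] := by simpa [IsEmptyA] using hE
    obtain ⟨k, hk⟩ := maxListA_isSome L hne
    rw [hm] at hk
    exact absurd hk (by simp)
  | case3 L hE m hm hmem ih =>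
    have hmL : m ∈ L := maxListA_mem L m hm
    have hmD : m ∈ DeleteElmA m L := (IsMemberA_iff _ _).mp hmem
    have heq : DescendingSortUnique L = DescendingSortUnique (DeleteElmA m L) := by
      rw [DescendingSortUnique, if_neg hE]
      split
      · next h => rw [hm] at h; cases h
      · next m' h =>
        rw [hm] at h
        injection h with h
        subst h
        rw [if_pos hmem]
    rw [heq]
    refine ⟨ih.1, fun y => ?_⟩
    rw [ih.2 y]
    exact mem_DeleteElmA_iff_of_mem L m y hmD
  | case4 L hE m hm hmem ih =>
    have hmL : m ∈ L := maxListA_mem L m hm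
    have hmD : m ∉ DeleteElmA m L := by
      intro h; exact hmem ((IsMemberA_iff _ _).mpr h)
    have heq : DescendingSortUnique L = m :: DescendingSortUnique (DeleteElmA m L) := by
      rw [DescendingSortUnique, if_neg hE]
      split
      · next h => rw [hm] at h; cases h
      · next m' h =>
        rw [hm] at h
        injection h with h
        subst h
        rw [if_neg hmem, KonsoA_eq]
    rw [heq]
    constructor
    · refine List.pairwise_cons.mpr ⟨?_, ih.1⟩
      intro y hy
      have hyD : y ∈ DeleteElmA m L := (ih.2 y).mp hy
      have hyL : y ∈ L := mem_DeleteElmA L m y hyD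
      have hle : y ≤ m := maxListA_ge L m hm y hyL
      have hne : y ≠ m := fun he => hmD (he ▸ hyD)
      omega
    · intro y
      simp only [List.mem_cons, ih.2 y, mem_DeleteElmA_iff_of_not_mem L m y hmD]
      constructor
      · rintro (h | ⟨h, _⟩)
        · exact h ▸ hmL
        · exact h
      · intro hy
        by_cases hym : y = m
        · exact Or.inl hym
        · exact Or.inr ⟨hy, hym⟩

-- in a strictly descending list every element is at least the last one
theorem getLast_min_of_pairwise_gt : ∀ (acc : List Int) (l : Int), acc.getLast? = some l →
    acc.Pairwise (· > ·) → ∀ a ∈ acc, l ≤ a := by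
  intro acc
  induction acc with
  | nil => intro l h; simp at h
  | cons a t ih =>
    intro l hl hp b hb
    cases t with
    | nil =>
      simp at hl hb
      omega
    | cons c u =>
      rw [List.getLast?_cons_cons] at hl
      have hat := (List.pairwise_cons.mp hp).1
      have hlc := ih l hl (List.pairwise_cons.mp hp).2
      rcases List.mem_cons.mp hb with h | h
      · have : l ≤ c := hlc c (by simp)
        have : a > c := hat c (by simp)
        omega
      · exact hlc b h

-- B's loop invariant: folding the dedup step over a weakly-descending suffix keeps the
-- accumulator strictly descending and accumulates exactly the members
theorem fold_dedup_spec : ∀ (s acc : List Int),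
    s.Pairwise (fun a b => b ≤ a) →
    acc.Pairwise (· > ·) →
    (∀ a ∈ acc, ∀ z ∈ s, z ≤ a) →
    (s.foldl (fun res x => if res = [] ∨ res.getLast? ≠ some x then res ++ [x] else res) acc).Pairwise (· > ·) ∧
    (∀ y, y ∈ s.foldl (fun res x => if res = [] ∨ res.getLast? ≠ some x then res ++ [x] else res) acc ↔ y ∈ acc ∨ y ∈ s) := by
  intro s
  induction s with
  | nil => intro acc _ h2 _; exact ⟨h2, by simp⟩
  | cons x s' ih =>
    intro acc hs hacc hbound
    have hs' : s'.Pairwise (fun a b => b ≤ a) := (List.pairwise_cons.mp hs).2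
    have hxs' : ∀ z ∈ s', z ≤ x := (List.pairwise_cons.mp hs).1
    by_cases hc : acc = [] ∨ acc.getLast? ≠ some x
    · have hstep : (x :: s').foldl (fun res x => if res = [] ∨ res.getLast? ≠ some x then res ++ [x] else res) acc
          = s'.foldl (fun res x => if res = [] ∨ res.getLast? ≠ some x then res ++ [x] else res) (acc ++ [x]) := by
        simp only [List.foldl_cons, if_pos hc]
      have hxlt : ∀ a ∈ acc, x < a := by
        intro a ha
        rcases hc with hc | hc
        · subst hc; simp at ha
        · have hne : acc ≠ [] := by intro he; subst he; simp at ha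
          obtain ⟨l, hl⟩ : ∃ l, acc.getLast? = some l := by
            cases hl' : acc.getLast? with
            | none => exact absurd (List.getLast?_eq_none_iff.mp hl') hne
            | some l => exact ⟨l, rfl⟩
          have hxl : x ≤ l := hbound l (List.mem_of_getLast? hl) x (by simp)
          have hxnl : x ≠ l := by intro he; exact hc (he ▸ hl)
          have hla : l ≤ a := getLast_min_of_pairwise_gt acc l hl hacc a ha
          omega
      have hacc' : (acc ++ [x]).Pairwise (· > ·) := by
        rw [List.pairwise_append]
        exact ⟨hacc, by simp, by intro a ha b hb; simp at hb; subst hb; exact hxlt a ha⟩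
      have hbound' : ∀ a ∈ acc ++ [x], ∀ z ∈ s', z ≤ a := by
        intro a ha z hz
        rcases List.mem_append.mp ha with h | h
        · exact hbound a h z (List.mem_cons_of_mem _ hz)
        · simp at h; subst h; exact hxs' z hz
      rw [hstep]
      obtain ⟨hp, hmem⟩ := ih (acc ++ [x]) hs' hacc' hbound'
      refine ⟨hp, fun y => ?_⟩
      rw [hmem y]
      simp [or_assoc]
    · have hne : acc ≠ [] := fun h => hc (Or.inl h)
      have hlast : acc.getLast? = some x := not_not.mp (fun h => hc (Or.inr h))
      have hstep : (x :: s').foldl (fun res x => if res = [] ∨ res.getLast? ≠ some x then res ++ [x] else res) acc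
          = s'.foldl (fun res x => if res = [] ∨ res.getLast? ≠ some x then res ++ [x] else res) acc := by
        simp only [List.foldl_cons]
        rw [if_neg (by simp [hne, hlast])]
      have hbound' : ∀ a ∈ acc, ∀ z ∈ s', z ≤ a :=
        fun a ha z hz => hbound a ha z (List.mem_cons_of_mem _ hz)
      rw [hstep]
      obtain ⟨hp, hmem⟩ := ih acc hs' hacc hbound'
      refine ⟨hp, fun y => ?_⟩
      rw [hmem y]
      have hxacc : x ∈ acc := List.mem_of_getLast? hlast
      constructor
      · rintro (h | h)
        · exact Or.inl h
        · exact Or.inr (List.mem_cons_of_mem _ h)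
      · rintro (h | h)
        · exact Or.inl h
        · rcases List.mem_cons.mp h with h | h
          · exact Or.inl (h ▸ hxacc)
          · exact Or.inr h

-- two strictly-descending lists with the same members are equal
theorem eq_of_pairwise_gt : ∀ (l1 l2 : List Int), l1.Pairwise (· > ·) → l2.Pairwise (· > ·) →
    (∀ y, y ∈ l1 ↔ y ∈ l2) → l1 = l2 := by
  intro l1
  induction l1 with
  | nil =>
    intro l2 _ _ hmem
    cases l2 with
    | nil => rfl
    | cons b u => exact absurd ((hmem b).mpr (by simp)) (by simp)
  | cons a t ih =>
    intro l2 h1 h2 hmem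
    cases l2 with
    | nil => exact absurd ((hmem a).mp (by simp)) (by simp)
    | cons b u =>
      have hab : a = b := by
        have ha : a ∈ b :: u := (hmem a).mp (by simp)
        have hb : b ∈ a :: t := (hmem b).mpr (by simp)
        have h1' := (List.pairwise_cons.mp h1).1
        have h2' := (List.pairwise_cons.mp h2).1
        rcases List.mem_cons.mp ha with h | h
        · exact h
        · have hb' : b > a := h2' a h
          rcases List.mem_cons.mp hb with h'' | h'' 
          · omega
          · have := h1' b h''; omega
      subst hab
      have ht : t = u := by
        apply ih u (List.pairwise_cons.mp h1).2 (List.pairwise_cons.mp h2).2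
        intro y
        have h1' := (List.pairwise_cons.mp h1).1
        have h2' := (List.pairwise_cons.mp h2).1
        constructor
        · intro hy
          have : y ∈ a :: u := (hmem y).mp (List.mem_cons_of_mem _ hy)
          rcases List.mem_cons.mp this with h | h
          · have := h1' y hy; omega
          · exact h
        · intro hy
          have : y ∈ a :: t := (hmem y).mpr (List.mem_cons_of_mem _ hy)
          rcases List.mem_cons.mp this with h | h
          · have := h2' y hy; omega
          · exact h
      rw [ht]

-- ===== VERDICT (by name: the statement is the Claim_ definition above) =====
theorem DescendingSortUnique_spec : Claim_equal_DescendingSortUnique := by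
  unfold Claim_equal_DescendingSortUnique Spec_DescendingSortUnique
  intro L _
  have hA := DescendingSortUnique_char L
  have hsorted := PySem.List.sorted_pairwise_rev (xs := L) (key := fun x => x)
  have hfold := fold_dedup_spec (PySem.List.sorted L (fun x => x) true) [] hsorted
    (by simp) (by simp)
  apply eq_of_pairwise_gt _ _ hA.1
  · exact hfold.1
  · intro y
    rw [hA.2 y]
    unfold DescendingSortUnique_alt
    rw [hfold.2 y]
    simp [PySem.List.mem_sorted]
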